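-- pv_equiv track=rewrite | github.com/ryanhou28/puLang | pypulang/resolution.py | _apply_inversion
-- ===== SOURCE A (Python) =====
-- def _apply_inversion(pitches: list[int], inversion: int) -> list[int]:
--     """
--     Apply chord inversion by raising bass notes by an octave.
--
--     Args:
--         pitches: List of MIDI pitches (sorted low to high)
--         inversion: 0=root, 1=first, 2=second, 3=third
--
--     Returns:
--         Inverted chord pitches (sorted)
--     """
--     if inversion == 0:
--         return pitches
--
--     pitches = list(pitches)  # Copy to avoid mutation
--
--     for _ in range(inversion):
--         if len(pitches) > 1:
--             # Move lowest note up an octave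
--             lowest = pitches.pop(0)
--             pitches.append(lowest + 12)
--
--     return sorted(pitches)
-- ===== SOURCE B (Python) =====
-- def _apply_inversion(pitches: list[int], inversion: int) -> list[int]:
--     """
--     Apply chord inversion by raising bass notes by an octave.
--     Closed-form: each index i gains base octaves, plus one more for the
--     first rem indices, where base, rem = divmod(inversion, len(pitches)).
--     """
--     if inversion == 0:
--         return pitches
--     n = len(pitches)
--     if n <= 1 or inversion < 0:
--         return sorted(pitches)
--     base, rem = divmod(inversion, n)
--     return sorted(p + 12 * (base + (1 if i < rem else 0))
--                   for i, p in enumerate(pitches))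
-- ===== Notes on version B (the rewrite author's own statement) =====
-- stated objective: faster
-- what changed: Replaces the inversion-step FIFO simulation (pop lowest, append +12, repeated `inversion` times) with a closed-form divmod that computes each note's octave shift in one pass.
import Mathlib
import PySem

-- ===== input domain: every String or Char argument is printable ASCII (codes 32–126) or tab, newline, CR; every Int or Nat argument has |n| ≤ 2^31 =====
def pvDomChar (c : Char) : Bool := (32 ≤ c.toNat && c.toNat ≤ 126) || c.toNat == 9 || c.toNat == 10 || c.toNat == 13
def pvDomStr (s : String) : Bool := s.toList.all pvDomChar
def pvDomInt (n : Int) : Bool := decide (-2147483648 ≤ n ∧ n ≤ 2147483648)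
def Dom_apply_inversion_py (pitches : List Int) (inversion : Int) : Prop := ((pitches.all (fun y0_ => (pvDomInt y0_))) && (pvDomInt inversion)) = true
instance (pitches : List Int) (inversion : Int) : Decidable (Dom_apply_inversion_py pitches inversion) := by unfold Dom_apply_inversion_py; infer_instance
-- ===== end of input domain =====

-- B replaces A's per-step FIFO pop/append loop by a closed-form divmod octave count per index; equivalence of return values is proved (A never mutates its argument).

-- ===== PORT A =====
-- one iteration of A's loop body
def pvStepA (acc : List Int) : List Int :=
  if acc.length > 1 then
    match PySem.List.pop? acc 0 with
    | some (lowest, rest) => rest ++ [lowest + 12]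
    | none => acc
  else acc

def apply_inversion_py (pitches : List Int) (inversion : Int) : List Int :=
  if inversion == 0 then pitches
  else
    let ps := (PySem.List.pyRange 0 inversion 1).foldl (fun acc _ => pvStepA acc) pitches
    PySem.List.sorted ps (fun x => x) false

-- ===== PORT B =====
def apply_inversion_py_alt (pitches : List Int) (inversion : Int) : List Int :=
  if inversion == 0 then pitches
  else
    let n : Int := pitches.length
    if n ≤ 1 ∨ inversion < 0 then PySem.List.sorted pitches (fun x => x) false
    else
      let base := PySem.Int.floordiv inversion n
      let rem := PySem.Int.mod inversion n
      PySem.List.sorted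
        ((PySem.List.enumerate pitches).map
          (fun ip => ip.2 + 12 * (base + (if ip.1 < rem then (1:Int) else 0))))
        (fun x => x) false

-- ===== PRECONDITION & SPEC =====
def Spec_apply_inversion_py (pitches : List Int) (inversion : Int) (out : List Int) : Prop := out = apply_inversion_py_alt pitches inversion
instance (pitches : List Int) (inversion : Int) (out : List Int) : Decidable (Spec_apply_inversion_py pitches inversion out) := by unfold Spec_apply_inversion_py; infer_instance

-- ===== CLAIM (what is proved, stated in full; the proofs are below) =====
def Claim_equal_apply_inversion_py : Prop := ∀ (pitches : List Int) (inversion : Int), Dom_apply_inversion_py pitches inversion → Spec_apply_inversion_py pitches inversion (apply_inversion_py pitches inversion)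

-- ===== LEMMAS AND PROOFS =====

-- a foldl whose body ignores the list element is an iterate
theorem pv_foldl_const {α β : Type} (f : β → β) :
    ∀ (l : List α) (init : β), l.foldl (fun s _ => f s) init = f^[l.length] init := by
  intro l
  induction l with
  | nil => intro init; rfl
  | cons x xs ih =>
      intro init
      simp [List.foldl_cons, ih, Function.iterate_succ_apply]

-- short lists are fixed points of A's step
theorem pvStepA_short {xs : List Int} (h : xs.length ≤ 1) : pvStepA xs = xs := by
  unfold pvStepA
  have : ¬ xs.length > 1 := by omega
  simp [this]

theorem pvStepA_iter_short {xs : List Int} (h : xs.length ≤ 1) (k : Nat) :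
    pvStepA^[k] xs = xs := by
  induction k with
  | zero => rfl
  | succ m ih => rw [Function.iterate_succ_apply, pvStepA_short h, ih]

-- one step of A's loop on a list with at least two elements
theorem pvStepA_cons (a : Int) (t : List Int) (h : t ≠ []) :
    pvStepA (a :: t) = t ++ [a + 12] := by
  unfold pvStepA
  have hl : (a :: t).length > 1 := by
    cases t with
    | nil => exact absurd rfl h
    | cons b tb => simp
  rw [if_pos hl, PySem.List.pop?_zero_cons]

-- closed form of A's loop state after k steps (n = length ≥ 2)
theorem pvStepA_iter_closed (xs : List Int) (h2 : 2 ≤ xs.length) (k : Nat) :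
    pvStepA^[k] xs =
      (xs.drop (k % xs.length)).map (fun p => p + 12 * ((k / xs.length : Nat) : Int)) ++
      (xs.take (k % xs.length)).map (fun p => p + 12 * ((k / xs.length : Nat) : Int) + 12) := by
  induction k with
  | zero =>
      simp [Nat.zero_mod, Nat.zero_div]
  | succ m ih =>
      rw [Function.iterate_succ_apply', ih]
      set n := xs.length with hn
      have hnpos : 0 < n := by omega
      have hr : m % n < n := Nat.mod_lt _ hnpos
      set r := m % n with hrdef
      set q := m / n with hqdef
      have hdm : n * q + r = m := Nat.div_add_mod m n
      have hrlen : r < xs.length := by omega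
      have hdropcons : xs.drop r = xs[r] :: xs.drop (r + 1) :=
        List.drop_eq_getElem_cons hrlen
      have htake : xs.take (r + 1) = xs.take r ++ [xs[r]] := by
        rw [List.take_add_one, List.getElem?_eq_getElem hrlen]
        rfl
      rw [hdropcons]
      simp only [List.map_cons, List.cons_append]
      rw [pvStepA_cons _ _ (by
        intro habs
        have := congrArg List.length habs
        simp only [List.length_append, List.length_map, List.length_drop,
          List.length_take, List.length_nil] at this
        omega)]
      by_cases hcase : r + 1 < n
      · -- same octave count, index advances
        have e1 : m + 1 = (r + 1) + n * q := by omega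
        have hm1 : (m + 1) % n = r + 1 := by
          rw [e1, Nat.add_mul_mod_self_left, Nat.mod_eq_of_lt hcase]
        have hq1 : (m + 1) / n = q := by
          rw [e1, Nat.add_mul_div_left _ _ hnpos, Nat.div_eq_of_lt hcase, Nat.zero_add]
        rw [hm1, hq1, htake, List.map_append]
        simp
      · -- wrap-around: every note has gained one more octave
        have hreq : r + 1 = n := by omega
        have e1 : m + 1 = 0 + n * (q + 1) := by rw [Nat.mul_add, Nat.mul_one]; omega
        have hm1 : (m + 1) % n = 0 := by
          rw [e1, Nat.add_mul_mod_self_left, Nat.zero_mod]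
        have hq1 : (m + 1) / n = q + 1 := by
          rw [e1, Nat.add_mul_div_left _ _ hnpos, Nat.zero_div, Nat.zero_add]
        have hdropn : xs.drop (r + 1) = [] := by rw [hreq, hn]; exact List.drop_length
        have htaken : xs.take (r + 1) = xs := by rw [hreq, hn]; exact List.take_length
        have hfun : (fun p : Int => p + 12 * (((q + 1 : Nat)) : Int)) =
            (fun p : Int => p + 12 * ((q : Nat) : Int) + 12) := by
          funext p; push_cast; ring
        rw [hm1, hq1, hdropn]
        simp only [List.map_nil, List.nil_append, List.drop_zero, List.take_zero,
          List.append_nil, hfun]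
        conv_rhs => rw [← htaken, htake]
        rw [List.map_append]
        simp

-- B's comprehension on an enumerate whose indices all lie below rem
theorem pv_enum_map_lo (base rem : Int) :
    ∀ (xs : List Int) (s : Int), s + xs.length ≤ rem →
      (PySem.List.enumerate xs s).map
          (fun ip => ip.2 + 12 * (base + if ip.1 < rem then (1:Int) else 0)) =
        xs.map (fun p => p + 12 * (base + 1)) := by
  intro xs
  induction xs with
  | nil => intro s _; simp [PySem.List.enumerate_nil]
  | cons x t ih =>
      intro s hs
      rw [PySem.List.enumerate_cons]
      simp only [List.length_cons] at hs
      have hlt : s < rem := by push_cast at hs ⊢; omega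
      simp only [List.map_cons, if_pos hlt]
      rw [ih (s + 1) (by push_cast at hs ⊢; omega)]

-- B's comprehension on an enumerate whose indices all lie at or above rem
theorem pv_enum_map_hi (base rem : Int) :
    ∀ (xs : List Int) (s : Int), rem ≤ s →
      (PySem.List.enumerate xs s).map
          (fun ip => ip.2 + 12 * (base + if ip.1 < rem then (1:Int) else 0)) =
        xs.map (fun p => p + 12 * base) := by
  intro xs
  induction xs with
  | nil => intro s _; simp [PySem.List.enumerate_nil]
  | cons x t ih =>
      intro s hs
      rw [PySem.List.enumerate_cons]
      have hnlt : ¬ s < rem := by omega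
      simp only [List.map_cons, if_neg hnlt, add_zero]
      rw [ih (s + 1) (by omega)]

-- ===== VERDICT (by name: the statement is the Claim_ definition above) =====
theorem apply_inversion_py_spec : Claim_equal_apply_inversion_py := by
  intro pitches inversion _dom
  unfold Spec_apply_inversion_py apply_inversion_py apply_inversion_py_alt
  by_cases h0 : inversion = 0
  · simp [h0]
  · rw [if_neg (by simpa using h0), if_neg (by simpa using h0)]
    rw [pv_foldl_const pvStepA]
    by_cases hneg : inversion < 0
    · -- negative inversion: empty range, both sides sort pitches
      rw [PySem.List.pyRange_one_eq_nil (by omega)]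
      rw [if_pos (Or.inr hneg)]
      rfl
    · have hpos : 0 < inversion := by omega
      by_cases hshort : pitches.length ≤ 1
      · -- fewer than two notes: the loop is a no-op
        rw [pvStepA_iter_short hshort]
        rw [if_pos (Or.inl (by exact_mod_cast hshort))]
      · -- main case
        have h2 : 2 ≤ pitches.length := by omega
        set k := inversion.toNat with hkdef
        have hk : (k : Int) = inversion := Int.toNat_of_nonneg (by omega)
        set n := pitches.length with hndef
        have hlenrange : (PySem.List.pyRange 0 inversion 1).length = k := by
          rw [PySem.List.length_pyRange_one]
          simp [hkdef]
        rw [hlenrange, pvStepA_iter_closed pitches h2 k]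
        rw [if_neg (by omega)]
        have hbase : PySem.Int.floordiv inversion ((n : Nat) : Int) =
            ((k / n : Nat) : Int) := by
          rw [← hk]; exact PySem.Int.floordiv_natCast k n
        have hrem : PySem.Int.mod inversion ((n : Nat) : Int) =
            ((k % n : Nat) : Int) := by
          rw [← hk]; exact PySem.Int.mod_natCast k n
        simp only [hbase, hrem]
        set r := k % n with hrdef
        set q := k / n with hqdef
        have hrn : r < n := Nat.mod_lt _ (by omega)
        -- split B's enumerate at index r
        have hsplit : pitches = pitches.take r ++ pitches.drop r :=
          (List.take_append_drop r pitches).symm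
        have htlen : (pitches.take r).length = r := by
          rw [List.length_take]; omega
        have hB : (PySem.List.enumerate pitches 0).map
            (fun ip => ip.2 + 12 * (((q : Nat) : Int) + if ip.1 < ((r : Nat) : Int) then (1:Int) else 0)) =
            (pitches.take r).map (fun p => p + 12 * (((q : Nat) : Int) + 1)) ++
            (pitches.drop r).map (fun p => p + 12 * ((q : Nat) : Int)) := by
          conv_lhs => rw [hsplit]
          rw [PySem.List.enumerate_append, List.map_append, htlen]
          rw [pv_enum_map_lo _ _ _ 0 (by omega)]
          rw [pv_enum_map_hi _ _ _ (0 + (r : Int)) (by omega)]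
        rw [hB]
        have hfun : (fun p : Int => p + 12 * (((q : Nat) : Int) + 1)) =
            (fun p : Int => p + 12 * ((q : Nat) : Int) + 12) := by
          funext p; ring
        rw [hfun]
        exact (PySem.List.sorted_eq_sorted_of_perm _ _ (fun x => x)
          (fun a b h => h) (List.perm_append_comm)).symm
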